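-- pv_equiv track=rewrite | github.com/lodyga/Python | codility.py | solution
-- ===== SOURCE A (Python) =====
-- def is_even_letters(word):
--     word_len = len([letter for letter in word if letter.isalpha()])
--     return not word_len % 2
--
-- def is_odd_digits(word):
--     word_len = len([digit for digit in word if digit.isdigit()])
--     return bool(word_len % 2)
--
-- def solution(S):
--     if not S:
--         return -1
--     sol = -1
--     for word in S.split():
--         if word.isalnum() and is_even_letters(word) and is_odd_digits(word):
--             sol = max(sol, len(word))
--     return sol
-- ===== SOURCE B (Python) =====
-- # B: one streaming pass over S (no split, no per-word rescans): toggle letter/digit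
-- # parity flags and an all-alnum flag per character, flushing the candidate at each
-- # whitespace boundary. Alternative algorithm, same results.
-- def _flush(best, length, pl, pd, ok):
--     # accept the just-finished run if it beats best
--     if length > best and ok and pl and pd:
--         return length
--     return best
--
-- def solution(S):
--     best = -1
--     length, pl, pd, ok = 0, True, False, True
--     for ch in S:
--         if ch.isspace():
--             best, length, pl, pd, ok = _flush(best, length, pl, pd, ok), 0, True, False, True
--         elif ch.isalpha():
--             length, pl = length + 1, not pl
--         elif ch.isdigit():
--             length, pd = length + 1, not pd
--         else:
--             length, ok = length + 1, False
--     return _flush(best, length, pl, pd, ok)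
-- ===== Notes on version B (the rewrite author's own statement) =====
-- stated objective: alternative
-- what changed: Replaces split() plus three full rescans of every word (isalnum, letter count, digit count) by a single streaming pass over the characters of S that maintains letter/digit parity flags and an all-alnum flag, flushing the max at whitespace boundaries.
import Mathlib
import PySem

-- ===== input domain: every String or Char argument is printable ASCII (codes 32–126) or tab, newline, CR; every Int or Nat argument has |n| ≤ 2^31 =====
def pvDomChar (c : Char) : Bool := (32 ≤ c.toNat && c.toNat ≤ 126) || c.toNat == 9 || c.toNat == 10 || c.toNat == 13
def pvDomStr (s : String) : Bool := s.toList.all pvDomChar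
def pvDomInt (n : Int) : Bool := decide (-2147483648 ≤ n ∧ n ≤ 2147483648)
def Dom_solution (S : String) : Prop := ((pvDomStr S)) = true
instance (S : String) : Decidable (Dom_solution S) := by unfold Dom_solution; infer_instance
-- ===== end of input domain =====

-- B replaces split() + three per-word rescans by one streaming pass with parity flags; alternative algorithm, same values.

-- ===== PORT A =====
def is_even_letters (word : String) : Bool :=
  let word_len := (word.toList.filter (fun letter => PySem.Chars.isalpha letter)).length
  word_len % 2 == 0

def is_odd_digits (word : String) : Bool :=
  let word_len := (word.toList.filter (fun digit => PySem.Chars.isdigit digit)).length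
  word_len % 2 == 1

def solution (S : String) : Int :=
  if S == "" then -1
  else
    (PySem.Str.split₀ S).foldl
      (fun sol word =>
        if PySem.Str.strIsalnum word && is_even_letters word && is_odd_digits word
        then max sol (PySem.Str.len word) else sol) (-1)

-- ===== PORT B =====
def pvFlush (best length : Int) (pl pd ok : Bool) : Int :=
  if length > best && ok && pl && pd then length else best

def pvStep (s : Int × Int × Bool × Bool × Bool) (ch : Char) : Int × Int × Bool × Bool × Bool :=
  let (best, length, pl, pd, ok) := s
  if PySem.Chars.isspace ch then
    (pvFlush best length pl pd ok, 0, true, false, true)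
  else if PySem.Chars.isalpha ch then (best, length + 1, !pl, pd, ok)
  else if PySem.Chars.isdigit ch then (best, length + 1, pl, !pd, ok)
  else (best, length + 1, pl, pd, false)

def solution_alt (S : String) : Int :=
  let st := S.toList.foldl pvStep (-1, 0, true, false, true)
  pvFlush st.1 st.2.1 st.2.2.1 st.2.2.2.1 st.2.2.2.2

-- ===== PRECONDITION & SPEC =====
def Spec_solution (S : String) (out : Int) : Prop := out = solution_alt S
instance (S : String) (out : Int) : Decidable (Spec_solution S out) := by unfold Spec_solution; infer_instance

-- ===== CLAIM (what is proved, stated in full; the proofs are below) =====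
def Claim_equal_solution : Prop := ∀ (S : String), Dom_solution S → Spec_solution S (solution S)

-- ===== LEMMAS AND PROOFS =====

def pvGood (w : List Char) : Bool :=
  PySem.Chars.strIsalnum w && ((w.filter PySem.Chars.isalpha).length % 2 == 0)
    && ((w.filter PySem.Chars.isdigit).length % 2 == 1)

def pvMax (sol : Int) (w : List Char) : Int :=
  if pvGood w then max sol (↑w.length) else sol

def pvSt (best : Int) (cur : List Char) : Int × Int × Bool × Bool × Bool :=
  (best, ↑cur.length, (cur.filter PySem.Chars.isalpha).length % 2 == 0,
   (cur.filter PySem.Chars.isdigit).length % 2 == 1, cur.all PySem.Chars.isalnum)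

def pvFinish (st : Int × Int × Bool × Bool × Bool) : Int :=
  pvFlush st.1 st.2.1 st.2.2.1 st.2.2.2.1 st.2.2.2.2

lemma pvGood_reverse (w : List Char) : pvGood w.reverse = pvGood w := by
  simp [pvGood, PySem.Chars.strIsalnum, List.filter_reverse]

lemma pvFinish_st (best : Int) (cur : List Char) :
    pvFinish (pvSt best cur) = pvMax best cur := by
  cases cur with
  | nil => simp [pvFinish, pvSt, pvFlush, pvMax, pvGood, PySem.Chars.strIsalnum]

  | cons c t =>
    simp only [pvFinish, pvSt, pvFlush, pvMax, pvGood, PySem.Chars.strIsalnum,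
      List.isEmpty_cons, Bool.not_false, Bool.true_and]
    by_cases hA : (List.filter PySem.Chars.isalpha (c :: t)).length % 2 == 0 <;>
    by_cases hD : (List.filter PySem.Chars.isdigit (c :: t)).length % 2 == 1 <;>
    by_cases hN : (c :: t).all PySem.Chars.isalnum <;>
      simp [hA, hD, hN] <;> split_ifs <;> omega

lemma pvParity_flip (n : Nat) :
    (((n + 1) % 2 == 0) = !(n % 2 == 0)) ∧ (((n + 1) % 2 == 1) = !(n % 2 == 1)) := by
  cases Nat.mod_two_eq_zero_or_one n with
  | inl h => simp [Nat.add_mod, h]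
  | inr h => simp [Nat.add_mod, h]

lemma pvAlpha_not_digit (c : Char) (h : PySem.Chars.isalpha c = true) :
    PySem.Chars.isdigit c = false := by
  simp only [PySem.Chars.isalpha, PySem.Chars.isupper, PySem.Chars.islower,
    Bool.or_eq_true, Bool.and_eq_true, decide_eq_true_eq] at h
  simp only [PySem.Chars.isdigit, Bool.and_eq_false_iff, decide_eq_false_iff_not]
  right
  intro h3
  rw [Char.le_def, UInt32.le_iff_toNat_le] at h3
  rw [show ('9'.val.toNat) = 57 from rfl] at h3
  rcases h with ⟨h1, _⟩ | ⟨h1, _⟩ <;> rw [Char.le_def, UInt32.le_iff_toNat_le] at h1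
  · rw [show ('A'.val.toNat) = 65 from rfl] at h1; omega
  · rw [show ('a'.val.toNat) = 97 from rfl] at h1; omega

lemma pvStep_nonspace (best : Int) (cur : List Char) (c : Char)
    (h : PySem.Chars.isspace c = false) :
    pvStep (pvSt best cur) c = pvSt best (c :: cur) := by
  by_cases hA : PySem.Chars.isalpha c
  · have hD := pvAlpha_not_digit c hA
    simp [pvStep, pvSt, h, hA, hD, PySem.Chars.isalnum,
      (pvParity_flip _).1]
  · by_cases hD : PySem.Chars.isdigit c
    · simp [pvStep, pvSt, h, hA, hD, PySem.Chars.isalnum,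
        (pvParity_flip _).2]
    · simp [pvStep, pvSt, h, hA, hD, PySem.Chars.isalnum]

lemma pvMax_reverse (best : Int) (w : List Char) : pvMax best w.reverse = pvMax best w := by
  simp [pvMax, pvGood_reverse]

lemma go_nil (cur : List Char) (acc : List (List Char)) :
    PySem.Chars.split₀.go [] cur acc =
      if cur.isEmpty then acc.reverse else (cur.reverse :: acc).reverse := rfl

lemma go_cons (c : Char) (rest cur : List Char) (acc : List (List Char)) :
    PySem.Chars.split₀.go (c :: rest) cur acc =
      if PySem.Chars.isspace c then
        (if cur.isEmpty then PySem.Chars.split₀.go rest [] acc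
         else PySem.Chars.split₀.go rest [] (cur.reverse :: acc))
      else PySem.Chars.split₀.go rest (c :: cur) acc := rfl

lemma go_append (cs : List Char) (cur : List Char) (acc : List (List Char)) :
    PySem.Chars.split₀.go cs cur acc = acc.reverse ++ PySem.Chars.split₀.go cs cur [] := by
  induction cs generalizing cur acc with
  | nil => by_cases h : cur.isEmpty <;> simp [go_nil, h]
  | cons c rest ih =>
    by_cases hs : PySem.Chars.isspace c
    · rw [go_cons, go_cons]
      simp only [hs, if_true]
      by_cases h : cur.isEmpty
      · simp only [h, if_true]
        rw [ih [] acc]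
      · simp only [h]
        rw [ih [] (cur.reverse :: acc), ih [] [cur.reverse]]
        simp
    · rw [Bool.not_eq_true] at hs
      rw [go_cons, go_cons]
      simp only [hs, Bool.false_eq_true, if_false]
      rw [ih (c :: cur) acc]

lemma loop_go (cs : List Char) (cur : List Char) (best : Int) :
    pvFinish (cs.foldl pvStep (pvSt best cur))
      = (PySem.Chars.split₀.go cs cur []).foldl pvMax best := by
  induction cs generalizing cur best with
  | nil =>
    by_cases h : cur.isEmpty
    · have : cur = [] := List.isEmpty_iff.mp h
      subst this
      simp [go_nil, pvFinish_st, pvMax, pvGood, PySem.Chars.strIsalnum]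
    · simp [go_nil, h, pvFinish_st, pvMax_reverse]
  | cons c rest ih =>
    by_cases hs : PySem.Chars.isspace c
    · have hstep : pvStep (pvSt best cur) c = pvSt (pvMax best cur) [] := by
        have := pvFinish_st best cur
        simp [pvStep, hs, pvSt, pvFinish] at this ⊢
        exact this
      by_cases h : cur.isEmpty
      · have hc : cur = [] := List.isEmpty_iff.mp h
        subst hc
        have hm : pvMax best [] = best := by
          simp [pvMax, pvGood, PySem.Chars.strIsalnum]
        simp only [List.foldl_cons, hstep, ih, hm]
        simp [go_cons, hs]
      · simp only [List.foldl_cons, hstep, ih]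
        rw [go_cons]
        simp only [hs, if_true, h]
        rw [go_append rest [] [cur.reverse]]
        simp [pvMax_reverse]
    · simp only [List.foldl_cons, pvStep_nonspace best cur c (by simpa using hs), ih]
      rw [go_cons]
      simp [hs]

lemma foldA_eq (l : List (List Char)) (sol : Int) :
    ((l.map String.ofList).foldl
      (fun sol word =>
        if PySem.Str.strIsalnum word && is_even_letters word && is_odd_digits word
        then max sol (PySem.Str.len word) else sol) sol)
      = l.foldl pvMax sol := by
  induction l generalizing sol with
  | nil => rfl
  | cons w t ih =>
    simp only [List.map_cons, List.foldl_cons, ih]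
    congr 1
    simp [pvMax, pvGood, is_even_letters, is_odd_digits, PySem.Str.strIsalnum,
      PySem.Str.len]

-- ===== VERDICT (by name: the statement is the Claim_ definition above) =====
theorem solution_spec : Claim_equal_solution := by
  intro S _
  show solution S = solution_alt S
  by_cases h : S = ""
  · subst h; decide
  · have hb : (S == "") = false := by simpa using h
    unfold solution solution_alt
    rw [hb]
    simp only [Bool.false_eq_true, if_false]
    have hsplit : PySem.Str.split₀ S =
        (PySem.Chars.split₀ S.toList).map String.ofList := rfl
    rw [hsplit, foldA_eq]
    have := loop_go S.toList [] (-1)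
    rw [show PySem.Chars.split₀ S.toList = PySem.Chars.split₀.go S.toList [] [] from rfl]
    rw [← this]
    rfl
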